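-- pv_equiv track=rewrite | github.com/beecave-homelab/sanitize-text | sanitize_text/webui/routes.py | _build_locale_selections
-- ===== SOURCE A (Python) =====
-- def _build_locale_selections(
--     selected_detectors: list[str] | None,
-- ) -> dict[str, list[str]] | None:
--     """Transform raw checkbox values into per-locale detector selections.
--
--     Returns:
--         Mapping from locale code to a sorted list of detector names, or ``None``
--         if no selections were provided.
--     """
--     if not selected_detectors:
--         return None
--
--     generic_selection = {token for token in selected_detectors if ":" not in token}
--     locale_map = {
--         "en_US": set(generic_selection),
--         "nl_NL": set(generic_selection),
--     }
--
--     for token in selected_detectors: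
--         if ":" not in token:
--             continue
--         prefix, _, detector_name = token.partition(":")
--         if prefix == "en":
--             locale_map["en_US"].add(detector_name)
--         elif prefix == "nl":
--             locale_map["nl_NL"].add(detector_name)
--
--     return {locale: sorted(detectors) for locale, detectors in locale_map.items()}
-- ===== SOURCE B (Python) =====
-- def _build_locale_selections(
--     selected_detectors: list[str] | None,
-- ) -> dict[str, list[str]] | None:
--     """Sort-then-scan, no sets: collect each locale's names (with duplicates)
--     in one scan, sort the list, and drop adjacent duplicates in a second scan."""
--     if not selected_detectors:
--         return None
--
--     def names_for(prefix):
--         collected = []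
--         for token in selected_detectors:
--             head, sep, tail = token.partition(":")
--             if not sep:
--                 collected.append(token)
--             elif head == prefix:
--                 collected.append(tail)
--         collected.sort()
--         out = []
--         for x in collected:
--             if not out or out[-1] != x:
--                 out.append(x)
--         return out
--
--     return {"en_US": names_for("en"), "nl_NL": names_for("nl")}
-- ===== Notes on version B (the rewrite author's own statement) =====
-- stated objective: alternative
-- what changed: Replaces A's set-based approach (a generic-token set comprehension copied into a dict of sets, a dispatch loop mutating those sets, then sorted) by a sort-then-scan algorithm with no sets at all: per locale it collects the contributing names into a plain list with duplicates, sorts it, and removes adjacent duplicates by structural recursion.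
import Mathlib
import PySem

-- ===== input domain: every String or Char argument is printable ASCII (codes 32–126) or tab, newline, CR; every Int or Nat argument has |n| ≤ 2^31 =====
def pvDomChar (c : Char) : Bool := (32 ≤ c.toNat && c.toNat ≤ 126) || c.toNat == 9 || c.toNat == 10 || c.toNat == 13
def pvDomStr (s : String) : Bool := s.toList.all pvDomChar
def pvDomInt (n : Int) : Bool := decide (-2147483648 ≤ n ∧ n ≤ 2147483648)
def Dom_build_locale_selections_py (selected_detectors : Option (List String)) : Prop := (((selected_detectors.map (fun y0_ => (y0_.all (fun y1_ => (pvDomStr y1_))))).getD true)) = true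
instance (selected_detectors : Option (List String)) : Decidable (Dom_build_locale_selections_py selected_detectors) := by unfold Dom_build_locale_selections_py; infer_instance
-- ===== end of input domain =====

-- B replaces A's set machinery (generic-token set copied into a dict of sets, a dispatch
-- loop mutating those sets, then sorted) by a setless sort-then-scan: per locale, collect
-- contributing names into a plain list with duplicates, sort, then drop adjacent
-- duplicates in a second scan; objective: alternative algorithm, same result.

-- ===== PORT A =====
-- hand port of str.partition(":") on the character list: exact — scans for the FIRST ':';
-- if none is found returns (s, "", "").
def partitionColon (l : List Char) : List Char × List Char × List Char :=
  match l with
  | [] => ([], [], [])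
  | c :: cs =>
    if c = ':' then ([], [':'], cs)
    else
      let r := partitionColon cs
      if r.2.1 = [] then (c :: cs, [], [])
      else (c :: r.1, r.2.1, r.2.2)

-- the body of A's dispatch loop ('for token in selected_detectors: …')
def aStep (lm : PySem.Dict String (PySem.Set String)) (token : String) :
    PySem.Dict String (PySem.Set String) :=
  if !(PySem.Str.isIn ":" token) then lm
  else
    let p := partitionColon token.toList
    let pfx := String.ofList p.1
    let detector_name := String.ofList p.2.2
    if pfx == "en" then lm.modify "en_US" PySem.Set.empty (fun s => PySem.Set.add s detector_name)
    else if pfx == "nl" then lm.modify "nl_NL" PySem.Set.empty (fun s => PySem.Set.add s detector_name)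
    else lm

def build_locale_selections_py (selected_detectors : Option (List String)) :
    Option (List (String × List String)) :=
  match selected_detectors with
  | none => none
  | some L =>
    if L = [] then none
    else
      let generic_selection : PySem.Set String :=
        PySem.Set.ofList (L.filter (fun t => !(PySem.Str.isIn ":" t)))
      let locale_map : PySem.Dict String (PySem.Set String) :=
        PySem.Dict.ofList [("en_US", PySem.Set.ofList generic_selection),
                           ("nl_NL", PySem.Set.ofList generic_selection)]
      let locale_map := L.foldl aStep locale_map
      some (locale_map.items.map (fun p => (p.1, PySem.List.sorted p.2 (fun x => x) false)))

-- ===== PORT B =====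
-- B's second scan ('for x in collected: if not out or out[-1] != x: out.append(x)')
def dedupFold (xs : List String) : List String :=
  xs.foldl (fun out x => if out.getLast? = some x then out else out ++ [x]) []

-- the body of B's collecting loop in names_for: partition once, append the contribution
def collectStep (pc : String) (out : List String) (token : String) : List String :=
  let p := partitionColon token.toList
  if p.2.1 = [] then out ++ [token]
  else if String.ofList p.1 == pc then out ++ [String.ofList p.2.2]
  else out

-- B's names_for(prefix): collect, sort, drop adjacent duplicates
def namesFor (L : List String) (pc : String) : List String :=
  dedupFold (PySem.List.sorted (L.foldl (collectStep pc) []) (fun x => x) false)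

def build_locale_selections_py_alt (selected_detectors : Option (List String)) :
    Option (List (String × List String)) :=
  match selected_detectors with
  | none => none
  | some L =>
    if L = [] then none
    else some [("en_US", namesFor L "en"), ("nl_NL", namesFor L "nl")]

-- ===== PRECONDITION & SPEC =====
def Spec_build_locale_selections_py (selected_detectors : Option (List String)) (out : Option (List (String × List String))) : Prop := out = build_locale_selections_py_alt selected_detectors
instance (selected_detectors : Option (List String)) (out : Option (List (String × List String))) : Decidable (Spec_build_locale_selections_py selected_detectors out) := by unfold Spec_build_locale_selections_py; infer_instance

-- ===== CLAIM =====
def Claim_equal_build_locale_selections_py : Prop := ∀ (selected_detectors : Option (List String)), Dom_build_locale_selections_py selected_detectors → Spec_build_locale_selections_py selected_detectors (build_locale_selections_py selected_detectors)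

-- ===== LEMMAS AND PROOFS =====

-- the separator component of partitionColon is [':'] iff the string contains ':'
theorem partitionColon_sep (l : List Char) :
    (partitionColon l).2.1 = if ':' ∈ l then [':'] else [] := by
  induction l with
  | nil => simp [partitionColon]
  | cons c cs ih =>
    by_cases hc : c = ':'
    · simp [partitionColon, hc]
    · simp only [partitionColon, if_neg hc]
      by_cases hm : ':' ∈ cs <;> simp [ih, hm, hc, eq_comm]

-- ':' in token (Python's ":" in token) read as list membership
theorem isIn_colon (l : List Char) :
    PySem.Chars.isIn [':'] l = decide (':' ∈ l) := by
  by_cases h : ':' ∈ l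
  · simp only [decide_eq_true h]
    rw [PySem.Chars.isIn_iff_infix]
    obtain ⟨s, u, hsu⟩ := List.append_of_mem h
    exact ⟨s, u, by simp [hsu]⟩
  · simp only [decide_eq_false h]
    cases hi : PySem.Chars.isIn [':'] l with
    | false => rfl
    | true =>
      exact absurd (((PySem.Chars.isIn_iff_infix _ _).1 hi).subset
        (show ':' ∈ [':'] by decide)) h

theorem isIn_colon_str (t : String) :
    PySem.Str.isIn ":" t = decide (':' ∈ t.toList) := by
  have h : (":".toList) = [':'] := by decide
  simp [isIn_colon, h]

-- abbreviations for the per-token data (proof-side only)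
def hasColon (t : String) : Bool := decide (':' ∈ t.toList)
def pfxOf (t : String) : String := String.ofList (partitionColon t.toList).1
def nameOf (t : String) : String := String.ofList (partitionColon t.toList).2.2

-- a conditional set-accumulating fold: membership characterisation
theorem mem_condFold (c : String → Bool) (v : String → String) (L : List String)
    (acc : PySem.Set String) (x : String) :
    x ∈ L.foldl (fun s t => if c t then PySem.Set.add s (v t) else s) acc ↔
      x ∈ acc ∨ ∃ t ∈ L, c t = true ∧ x = v t := by
  induction L generalizing acc with
  | nil => simp
  | cons h tl ih =>
    simp only [List.foldl_cons, ih]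
    by_cases hc : c h = true
    · simp [hc, PySem.Set.mem_add]
      try tauto
    · simp [hc]
      try tauto

-- a conditional set-accumulating fold preserves Nodup
theorem nodup_condFold (c : String → Bool) (v : String → String) (L : List String)
    (acc : PySem.Set String) (h : acc.Nodup) :
    (L.foldl (fun s t => if c t then PySem.Set.add s (v t) else s) acc).Nodup := by
  induction L generalizing acc with
  | nil => exact h
  | cons hd tl ih =>
    simp only [List.foldl_cons]
    by_cases hc : c hd = true
    · exact ih _ (by simpa [hc] using PySem.Set.nodup_add acc (v hd) h)
    · simpa [hc] using ih _ h

-- A's loop on the two-entry dict acts componentwise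
theorem aLoop_mk (L : List String) (e n : PySem.Set String) :
    L.foldl aStep (PySem.Dict.ofList [("en_US", e), ("nl_NL", n)]) =
      PySem.Dict.ofList
        [("en_US", L.foldl (fun s t => if hasColon t && (pfxOf t == "en") then PySem.Set.add s (nameOf t) else s) e),
         ("nl_NL", L.foldl (fun s t => if hasColon t && (pfxOf t == "nl") then PySem.Set.add s (nameOf t) else s) n)] := by
  induction L generalizing e n with
  | nil => simp
  | cons t tl ih =>
    simp only [List.foldl_cons]
    rw [show aStep (PySem.Dict.ofList [("en_US", e), ("nl_NL", n)]) t =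
        PySem.Dict.ofList
          [("en_US", if hasColon t && (pfxOf t == "en") then PySem.Set.add e (nameOf t) else e),
           ("nl_NL", if hasColon t && (pfxOf t == "nl") then PySem.Set.add n (nameOf t) else n)] from ?_,
      ih]
    simp only [aStep, hasColon, pfxOf, nameOf]
    rw [isIn_colon_str]
    by_cases hcol : ':' ∈ t.toList
    · simp only [hcol, decide_true, Bool.not_true, Bool.true_and]
      by_cases hen : String.ofList (partitionColon t.toList).1 == "en"
      · simp_all [PySem.Dict.ofList, PySem.Dict.modify, PySem.Dict.insert, PySem.Dict.getD,
          PySem.Dict.get?, PySem.Dict.empty, PySem.Dict.update]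
      · by_cases hnl : String.ofList (partitionColon t.toList).1 == "nl" <;>
          simp_all [PySem.Dict.ofList, PySem.Dict.modify, PySem.Dict.insert, PySem.Dict.getD,
            PySem.Dict.get?, PySem.Dict.empty, PySem.Dict.update]
    · simp [hcol]

-- items of the two-entry literal dict
theorem items_ofList_two (e n : PySem.Set String) :
    (PySem.Dict.ofList [("en_US", e), ("nl_NL", n)]).items = [("en_US", e), ("nl_NL", n)] := by
  simp [PySem.Dict.ofList, PySem.Dict.empty, PySem.Dict.update, PySem.Dict.insert,
    PySem.Dict.contains]

-- membership in B's collected (multi-)list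
theorem mem_collect (pc : String) (L : List String) (acc : List String) (x : String) :
    x ∈ L.foldl (collectStep pc) acc ↔
      x ∈ acc ∨ ∃ t ∈ L,
        (hasColon t = false ∧ x = t) ∨ (hasColon t = true ∧ pfxOf t = pc ∧ x = nameOf t) := by
  induction L generalizing acc with
  | nil => simp
  | cons t tl ih =>
    simp only [List.foldl_cons, ih]
    rw [show collectStep pc acc t =
        if hasColon t then (if pfxOf t = pc then acc ++ [nameOf t] else acc)
        else acc ++ [t] from ?_]
    · by_cases hcol : hasColon t = true
      · by_cases hp : pfxOf t = pc
        · simp only [hcol, hp, if_true, List.mem_append, List.mem_cons, List.not_mem_nil, or_false]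
          constructor
          · rintro ((hx | rfl) | ⟨u, hu, hc⟩)
            · exact Or.inl hx
            · exact Or.inr ⟨t, Or.inl rfl, Or.inr ⟨hcol, hp, rfl⟩⟩
            · exact Or.inr ⟨u, Or.inr hu, hc⟩
          · rintro (hx | ⟨u, rfl | hu, hc⟩)
            · exact Or.inl (Or.inl hx)
            · rcases hc with ⟨hf, _⟩ | ⟨_, _, rfl⟩
              · simp [hcol] at hf
              · exact Or.inl (Or.inr rfl)
            · exact Or.inr ⟨u, hu, hc⟩
        · simp only [hcol, hp, if_true, if_false, List.mem_cons]
          constructor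
          · rintro (hx | ⟨u, hu, hc⟩)
            · exact Or.inl hx
            · exact Or.inr ⟨u, Or.inr hu, hc⟩
          · rintro (hx | ⟨u, rfl | hu, hc⟩)
            · exact Or.inl hx
            · rcases hc with ⟨hf, _⟩ | ⟨_, hpf, _⟩
              · simp [hcol] at hf
              · exact absurd hpf hp
            · exact Or.inr ⟨u, hu, hc⟩
      · have hcol' : hasColon t = false := by simpa using hcol
        simp only [hcol', Bool.false_eq_true, if_false, List.mem_append, List.mem_cons,
          List.not_mem_nil, or_false]
        constructor
        · rintro ((hx | rfl) | ⟨u, hu, hc⟩)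
          · exact Or.inl hx
          · exact Or.inr ⟨x, Or.inl rfl, Or.inl ⟨hcol', rfl⟩⟩
          · exact Or.inr ⟨u, Or.inr hu, hc⟩
        · rintro (hx | ⟨u, rfl | hu, hc⟩)
          · exact Or.inl (Or.inl hx)
          · rcases hc with ⟨_, rfl⟩ | ⟨ht, _, _⟩
            · exact Or.inl (Or.inr rfl)
            · simp [hcol'] at ht
          · exact Or.inr ⟨u, hu, hc⟩
    · simp only [collectStep, hasColon, pfxOf, nameOf]
      rw [partitionColon_sep]
      by_cases hcol : ':' ∈ t.toList
      · simp only [hcol, if_true, decide_true, if_true]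
        by_cases hp : String.ofList (partitionColon t.toList).1 = pc <;> simp [hp]
      · simp [hcol]

-- proof-side recursive characterisation of B's dedup scan: compare with the NEXT element
def dedupAdj (xs : List String) : List String :=
  match xs with
  | [] => []
  | [x] => [x]
  | x :: y :: rest => if x = y then dedupAdj (y :: rest) else x :: dedupAdj (y :: rest)

-- proof-side: dedup comparing each element with the last KEPT one (the fold's state)
def dedupCmp (p : String) (xs : List String) : List String :=
  match xs with
  | [] => []
  | x :: rest => if x = p then dedupCmp p rest else x :: dedupCmp x rest

theorem foldDedup_go (xs out : List String) (p : String) (h : out.getLast? = some p) :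
    xs.foldl (fun out x => if out.getLast? = some x then out else out ++ [x]) out =
      out ++ dedupCmp p xs := by
  induction xs generalizing out p with
  | nil => simp [dedupCmp]
  | cons x rest ih =>
    simp only [List.foldl_cons, dedupCmp]
    by_cases hxp : x = p
    · subst hxp
      rw [if_pos h, if_pos rfl, ih out x h]
    · rw [if_neg (by rw [h]; simpa using fun e => hxp e.symm), if_neg hxp,
        ih (out ++ [x]) x (by simp), List.append_assoc]
      simp

theorem cons_dedupCmp_eq_dedupAdj (rest : List String) (x : String) :
    x :: dedupCmp x rest = dedupAdj (x :: rest) := by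
  induction rest generalizing x with
  | nil => simp [dedupCmp, dedupAdj]
  | cons y rs ih =>
    simp only [dedupCmp, dedupAdj]
    by_cases hyx : y = x
    · subst hyx
      simpa using ih _
    · rw [if_neg hyx, if_neg (by simpa using fun e => hyx e.symm), ← ih y]

theorem dedupFold_eq_dedupAdj (xs : List String) : dedupFold xs = dedupAdj xs := by
  match xs with
  | [] => rfl
  | x :: rest =>
    unfold dedupFold
    rw [show List.foldl (fun out x => if out.getLast? = some x then out else out ++ [x]) []
          (x :: rest) =
        List.foldl (fun out x => if out.getLast? = some x then out else out ++ [x]) [x] rest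
        from by simp]
    rw [foldDedup_go rest [x] x (by simp), List.singleton_append, cons_dedupCmp_eq_dedupAdj]

-- dedupAdj keeps exactly the members
theorem mem_dedupAdj (xs : List String) (x : String) : x ∈ dedupAdj xs ↔ x ∈ xs := by
  induction xs with
  | nil => simp [dedupAdj]
  | cons a tl ih =>
    match tl, ih with
    | [], _ => simp [dedupAdj]
    | b :: rest, ih =>
      by_cases hab : a = b
      · subst hab
        rw [show dedupAdj (a :: a :: rest) = dedupAdj (a :: rest) from by simp [dedupAdj]]
        rw [ih]
        simp
      · simp only [dedupAdj, if_neg hab, List.mem_cons, ih]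

-- dedupAdj of a ≤-sorted list is strictly increasing
theorem pairwise_lt_dedupAdj (xs : List String) (h : xs.Pairwise (· ≤ ·)) :
    (dedupAdj xs).Pairwise (· < ·) := by
  induction xs with
  | nil => simp [dedupAdj]
  | cons a tl ih =>
    match tl, ih with
    | [], _ => simp [dedupAdj]
    | b :: rest, ih =>
      have htail : (b :: rest).Pairwise (· ≤ ·) := h.tail
      by_cases hab : a = b
      · rw [show dedupAdj (a :: b :: rest) = dedupAdj (b :: rest) from by simp [dedupAdj, hab]]
        exact ih htail
      · rw [show dedupAdj (a :: b :: rest) = a :: dedupAdj (b :: rest) from by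
          simp [dedupAdj, hab]]
        refine List.pairwise_cons.2 ⟨?_, ih htail⟩
        intro z hz
        have hz' : z ∈ b :: rest := (mem_dedupAdj _ _).1 hz
        have hle : a ≤ z := (List.pairwise_cons.1 h).1 z hz'
        rcases List.mem_cons.1 hz' with rfl | hzr
        · exact lt_of_le_of_ne hle hab
        · refine lt_of_le_of_ne hle ?_
          intro hEq
          have hbz : b ≤ z := (List.pairwise_cons.1 htail).1 z hzr
          exact hab (le_antisymm ((List.pairwise_cons.1 h).1 b (by simp))
            (by rw [hEq]; exact hbz))

-- the per-locale result lists coincide: A's sorted set = B's dedup of the sorted multiset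
theorem locale_lists_eq (L : List String) (pc : String) :
    PySem.List.sorted
      (L.foldl (fun s t => if hasColon t && (pfxOf t == pc) then PySem.Set.add s (nameOf t) else s)
        (PySem.Set.ofList (PySem.Set.ofList (L.filter (fun t => !(PySem.Str.isIn ":" t))))))
      (fun x => x) false = namesFor L pc := by
  unfold namesFor
  rw [dedupFold_eq_dedupAdj]
  set raw := L.foldl (collectStep pc) [] with hraw
  set ys := dedupAdj (PySem.List.sorted raw (fun x => x) false) with hys
  have hsortedRaw : (PySem.List.sorted raw (fun x => x) false).Pairwise (· ≤ ·) :=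
    PySem.List.sorted_pairwise raw (fun x => x)
  have hlt : ys.Pairwise (· < ·) := pairwise_lt_dedupAdj _ hsortedRaw
  refine PySem.List.sorted_eq_of_perm_of_pairwise_lt _ ys (fun x => x) ?_ hlt
  -- ys is a permutation of A's set: both Nodup, same membership
  have hnodupYs : ys.Nodup := hlt.imp ne_of_lt
  have hnodupA := nodup_condFold (fun t => hasColon t && (pfxOf t == pc)) nameOf L
    (PySem.Set.ofList (PySem.Set.ofList (L.filter (fun t => !(PySem.Str.isIn ":" t)))))
    (PySem.Set.nodup_ofList _)
  rw [List.perm_ext_iff_of_nodup hnodupYs hnodupA]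
  intro x
  rw [hys, mem_dedupAdj, PySem.List.mem_sorted, hraw, mem_collect, mem_condFold]
  simp only [List.not_mem_nil, false_or, PySem.Set.mem_ofList, List.mem_filter]
  constructor
  · rintro ⟨t, ht, ⟨hnc, rfl⟩ | ⟨hc, hp, rfl⟩⟩
    · exact Or.inl ⟨ht, by rw [isIn_colon_str]; simpa [hasColon] using hnc⟩
    · exact Or.inr ⟨t, ht, by simp [hc, hp], rfl⟩
  · rintro (⟨ht, hnc⟩ | ⟨t, ht, hc, rfl⟩)
    · refine ⟨x, ht, Or.inl ⟨?_, rfl⟩⟩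
      rw [isIn_colon_str] at hnc
      simpa [hasColon] using hnc
    · simp only [Bool.and_eq_true, beq_iff_eq] at hc
      exact ⟨t, ht, Or.inr ⟨hc.1, hc.2, rfl⟩⟩

-- ===== VERDICT =====
theorem build_locale_selections_py_spec : Claim_equal_build_locale_selections_py := by
  intro sd _
  unfold Spec_build_locale_selections_py build_locale_selections_py build_locale_selections_py_alt
  match sd with
  | none => rfl
  | some L =>
    by_cases hL : L = []
    · simp [hL]
    · simp only [if_neg hL]
      rw [aLoop_mk, items_ofList_two]
      simp only [List.map_cons, List.map_nil, Option.some.injEq]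
      rw [locale_lists_eq L "en", locale_lists_eq L "nl"]
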